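-- pv_equiv track=rewrite | github.com/blacksoxx/vmware-migration-agent | providers/azure/sizing_table.py | get_instance_type
-- ===== SOURCE A (Python) =====
-- from bisect import bisect_left
--
-- _AZURE_SIZING_TABLE: dict[int, list[tuple[int, str]]] = {
--     1: [
--         (1024, "Standard_B1s"),
--         (2048, "Standard_B1ms"),
--     ],
--     2: [
--         (4096, "Standard_B2s"),
--         (8192, "Standard_D2s_v5"),
--         (16384, "Standard_D2as_v5"),
--     ],
--     4: [
--         (8192, "Standard_D4s_v5"),
--         (16384, "Standard_D4s_v5"),
--         (32768, "Standard_D4as_v5"),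
--     ],
--     8: [
--         (16384, "Standard_D8s_v5"),
--         (32768, "Standard_D8s_v5"),
--         (65536, "Standard_D8as_v5"),
--     ],
--     16: [
--         (32768, "Standard_D16s_v5"),
--         (65536, "Standard_D16s_v5"),
--         (131072, "Standard_D16as_v5"),
--     ],
-- }
--
-- def get_instance_type(vcpus: int, ram_mb: int) -> str:
--     """Return Azure VM size using exact-vCPU and closest-ceiling RAM lookup."""
--     if vcpus <= 0:
--         raise ValueError("vcpus must be > 0")
--     if ram_mb <= 0:
--         raise ValueError("ram_mb must be > 0")
--
--     selected_vcpus = _select_vcpu_bucket(vcpus)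
--     options = _AZURE_SIZING_TABLE[selected_vcpus]
--
--     ram_values = [entry[0] for entry in options]
--     index = bisect_left(ram_values, ram_mb)
--
--     if index < len(options):
--         return options[index][1]
--
--     return options[-1][1]
--
-- def _select_vcpu_bucket(requested_vcpus: int) -> int:
--     if requested_vcpus in _AZURE_SIZING_TABLE:
--         return requested_vcpus
--
--     available = sorted(_AZURE_SIZING_TABLE)
--     for candidate in available:
--         if candidate >= requested_vcpus:
--             return candidate
--
--     return available[-1]
-- ===== SOURCE B (Python) =====
-- def get_instance_type(vcpus: int, ram_mb: int) -> str:
--     """Return Azure VM size using exact-vCPU and closest-ceiling RAM lookup."""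
--     if vcpus <= 0:
--         raise ValueError("vcpus must be > 0")
--     if ram_mb <= 0:
--         raise ValueError("ram_mb must be > 0")
--
--     # No table at all: the buckets are the powers of two 1..16, and every name
--     # except the three B-series entries follows the pattern
--     # "Standard_D{b}s_v5" (ram <= 4096*b) / "Standard_D{b}as_v5" (otherwise),
--     # so compute the bucket by doubling and synthesize the name arithmetically.
--     b = 1
--     while b < vcpus and b < 16:
--         b *= 2
--
--     if b == 1:
--         return "Standard_B1s" if ram_mb <= 1024 else "Standard_B1ms"
--     if b == 2 and ram_mb <= 4096:
--         return "Standard_B2s"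
--     suffix = "s" if ram_mb <= 4096 * b else "as"
--     return "Standard_D" + str(b) + suffix + "_v5"
-- ===== Notes on version B (the rewrite author's own statement) =====
-- stated objective: alternative
-- what changed: B drops the sizing table entirely: it computes the vCPU bucket by doubling a power of two and synthesizes the VM-size name arithmetically from the bucket and a single RAM threshold (4096*bucket), instead of A's dict lookup plus bisect_left binary search over a list of (ram, name) pairs.
import Mathlib
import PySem

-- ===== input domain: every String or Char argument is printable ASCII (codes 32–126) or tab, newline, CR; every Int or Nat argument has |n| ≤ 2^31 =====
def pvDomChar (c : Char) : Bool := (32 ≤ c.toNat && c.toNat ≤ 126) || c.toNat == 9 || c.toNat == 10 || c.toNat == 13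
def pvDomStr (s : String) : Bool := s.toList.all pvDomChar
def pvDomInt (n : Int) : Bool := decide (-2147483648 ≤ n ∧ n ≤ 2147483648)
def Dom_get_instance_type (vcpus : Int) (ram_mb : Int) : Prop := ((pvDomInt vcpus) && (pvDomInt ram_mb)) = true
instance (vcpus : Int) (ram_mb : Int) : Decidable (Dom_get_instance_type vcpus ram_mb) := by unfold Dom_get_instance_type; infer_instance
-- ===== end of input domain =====

-- B drops the table: it computes the vCPU bucket by doubling a power of two and
-- synthesizes the VM-size name arithmetically from the bucket and one RAM
-- threshold, instead of A's dict + bisect_left lookup (objective: alternative).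

-- ===== PORT A =====
-- The module-level table, as an insertion-ordered dict.
def azTable : PySem.Dict Int (List (Int × String)) :=
  PySem.Dict.ofList
  [ (1, [(1024, "Standard_B1s"), (2048, "Standard_B1ms")]),
    (2, [(4096, "Standard_B2s"), (8192, "Standard_D2s_v5"), (16384, "Standard_D2as_v5")]),
    (4, [(8192, "Standard_D4s_v5"), (16384, "Standard_D4s_v5"), (32768, "Standard_D4as_v5")]),
    (8, [(16384, "Standard_D8s_v5"), (32768, "Standard_D8s_v5"), (65536, "Standard_D8as_v5")]),
    (16, [(32768, "Standard_D16s_v5"), (65536, "Standard_D16s_v5"), (131072, "Standard_D16as_v5")]) ]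

-- 'for candidate in available: if candidate >= requested: return candidate'
def azSelLoop (available : List Int) (requested : Int) : Option Int :=
  match available with
  | [] => none
  | c :: rest => if c ≥ requested then some c else azSelLoop rest requested

def azSelectBucket (requested : Int) : Int :=
  if azTable.contains requested then requested
  else
    let available := PySem.List.sorted azTable.keys (fun x => x) false
    match azSelLoop available requested with
    | some c => c
    | none => (PySem.List.pyGet? available (-1)).getD 0   -- 'return available[-1]'; table is nonempty

-- bisect_left(a, x): lo=0, hi=len(a); while lo<hi: mid=(lo+hi)//2; if a[mid]<x: lo=mid+1 else hi=mid
-- (exact hand port; Nat '/' = Python '//' on the nonnegative indices; mid stays in range so getD's default is never used)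
-- the 'while lo < hi' loop, with fuel = hi - lo (each iteration shrinks hi - lo, so the fuel never runs out)
def azBisectLeftGo (a : List Int) (x : Int) : Nat → Nat → Nat → Nat
  | 0, lo, _ => lo
  | fuel + 1, lo, hi =>
    if lo < hi then
      let mid := (lo + hi) / 2
      if a.getD mid 0 < x then azBisectLeftGo a x fuel (mid + 1) hi
      else azBisectLeftGo a x fuel lo mid
    else lo

def azBisectLeft (a : List Int) (x : Int) (lo hi : Nat) : Nat :=
  azBisectLeftGo a x (hi - lo) lo hi

def get_instance_type (vcpus : Int) (ram_mb : Int) : String :=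
  if vcpus ≤ 0 then ""            -- raise ValueError (outside Pre_)
  else if ram_mb ≤ 0 then ""      -- raise ValueError (outside Pre_)
  else
    let options := (PySem.Dict.get? azTable (azSelectBucket vcpus)).getD []
    let ram_values := options.map Prod.fst
    let index := azBisectLeft ram_values ram_mb 0 ram_values.length
    if index < options.length then (options.getD index (0, "")).2
    else ((PySem.List.pyGet? options (-1)).getD (0, "")).2   -- options[-1][1]

-- ===== PORT B =====
-- 'b = 1; while b < vcpus and b < 16: b *= 2' — b doubles from 1, so 5 fuel
-- steps always cover the loop (1→2→4→8→16, then the guard b < 16 fails).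
def azDouble (fuel : Nat) (b vcpus : Int) : Int :=
  match fuel with
  | 0 => b
  | f + 1 => if b < vcpus ∧ b < 16 then azDouble f (b * 2) vcpus else b

def get_instance_type_alt (vcpus : Int) (ram_mb : Int) : String :=
  if vcpus ≤ 0 then ""            -- raise ValueError (outside Pre_)
  else if ram_mb ≤ 0 then ""      -- raise ValueError (outside Pre_)
  else
    let b := azDouble 5 1 vcpus
    if b = 1 then (if ram_mb ≤ 1024 then "Standard_B1s" else "Standard_B1ms")
    else if b = 2 ∧ ram_mb ≤ 4096 then "Standard_B2s"
    else
      let suffix := if ram_mb ≤ 4096 * b then "s" else "as"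
      "Standard_D" ++ PySem.Int.toStr b ++ suffix ++ "_v5"

-- ===== PRECONDITION & SPEC =====
-- A raises ValueError when vcpus <= 0 or ram_mb <= 0; exactly those inputs are excluded.
def Pre_get_instance_type (vcpus : Int) (ram_mb : Int) : Prop := 0 < vcpus ∧ 0 < ram_mb
instance (vcpus : Int) (ram_mb : Int) : Decidable (Pre_get_instance_type vcpus ram_mb) := by unfold Pre_get_instance_type; infer_instance
def pvWitness_get_instance_type : Int × Int := (3, 9000)

def Spec_get_instance_type (vcpus : Int) (ram_mb : Int) (out : String) : Prop := out = get_instance_type_alt vcpus ram_mb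
instance (vcpus : Int) (ram_mb : Int) (out : String) : Decidable (Spec_get_instance_type vcpus ram_mb out) := by unfold Spec_get_instance_type; infer_instance

-- ===== CLAIM (what is proved, stated in full; the proofs are below) =====
def Claim_equal_get_instance_type : Prop := ∀ (vcpus : Int) (ram_mb : Int), Dom_get_instance_type vcpus ram_mb → Pre_get_instance_type vcpus ram_mb → Spec_get_instance_type vcpus ram_mb (get_instance_type vcpus ram_mb)

-- ===== LEMMAS AND PROOFS =====

-- A's bucket selection agrees with the ceiling-power-of-two if-chain for positive vcpus.
theorem azSelectBucket_eq (v : Int) (hv : 0 < v) :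
    azSelectBucket v = if v ≤ 1 then 1 else if v ≤ 2 then 2 else if v ≤ 4 then 4
      else if v ≤ 8 then 8 else 16 := by
  have hk : azTable.keys = [1, 2, 4, 8, 16] := by decide
  have hs : PySem.List.sorted azTable.keys (fun x => x) false = [1, 2, 4, 8, 16] := by decide
  unfold azSelectBucket
  rw [hs]
  by_cases hm : azTable.contains v
  · rw [if_pos hm]
    rw [PySem.Dict.contains_iff_mem_keys, hk] at hm
    simp only [List.mem_cons, List.not_mem_nil, or_false] at hm
    rcases hm with h | h | h | h | h <;> subst h <;> norm_num
  · rw [if_neg hm]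
    rw [PySem.Dict.contains_iff_mem_keys, hk] at hm
    simp only [List.mem_cons, List.not_mem_nil, or_false] at hm
    push Not at hm
    obtain ⟨n1, n2, n4, n8, n16⟩ := hm
    simp only [azSelLoop, PySem.List.pyGet?, PySem.List.pyIdx?, ge_iff_le]
    split_ifs <;> simp_all

-- B's doubling loop computes the same ceiling power of two.
theorem azDouble_eq (v : Int) (hv : 0 < v) :
    azDouble 5 1 v = if v ≤ 1 then 1 else if v ≤ 2 then 2 else if v ≤ 4 then 4
      else if v ≤ 8 then 8 else 16 := by
  simp only [azDouble]
  norm_num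
  split_ifs <;> omega

-- bisect_left on a two-element list, written as the decision tree it executes.
theorem azBL2 (a b r : Int) :
    azBisectLeft [a, b] r 0 2 = if b < r then 2 else if a < r then 1 else 0 := by
  show azBisectLeftGo [a, b] r 2 0 2 = _
  simp only [azBisectLeftGo]
  norm_num

-- bisect_left on a three-element list, written as the decision tree it executes.
theorem azBL3 (a b c r : Int) :
    azBisectLeft [a, b, c] r 0 3 =
      if b < r then (if c < r then 3 else 2) else (if a < r then 1 else 0) := by
  show azBisectLeftGo [a, b, c] r 3 0 3 = _
  simp only [azBisectLeftGo]
  norm_num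

-- ===== VERDICT (by name: the statement is the Claim_ definition above) =====
theorem get_instance_type_spec : Claim_equal_get_instance_type := by
  intro v r hdom hpre
  obtain ⟨hv, hr⟩ := hpre
  clear hdom
  unfold Spec_get_instance_type get_instance_type get_instance_type_alt
  rw [azSelectBucket_eq v hv, azDouble_eq v hv]
  have hv' : ¬ v ≤ 0 := by omega
  have hr' : ¬ r ≤ 0 := by omega
  simp only [hv', hr', if_false]
  clear hv' hr' hr
  by_cases h1 : v ≤ 1
  · simp only [h1, if_true]
    rw [show (PySem.Dict.get? azTable 1).getD [] = [(1024, "Standard_B1s"), (2048, "Standard_B1ms")] from by decide]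
    norm_num
    rw [azBL2]
    split_ifs <;> first | rfl | (exfalso; omega)
  · simp only [h1, if_false]
    by_cases h2 : v ≤ 2
    · simp only [h2, if_true]
      rw [show (PySem.Dict.get? azTable 2).getD [] = [(4096, "Standard_B2s"), (8192, "Standard_D2s_v5"), (16384, "Standard_D2as_v5")] from by decide]
      norm_num
      rw [azBL3]
      rw [show PySem.Int.toStr 2 = "2" from by decide]
      split_ifs <;> first | rfl | (exfalso; omega)
    · simp only [h2, if_false]
      by_cases h4 : v ≤ 4
      · simp only [h4, if_true]
        rw [show (PySem.Dict.get? azTable 4).getD [] = [(8192, "Standard_D4s_v5"), (16384, "Standard_D4s_v5"), (32768, "Standard_D4as_v5")] from by decide]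
        norm_num
        rw [azBL3]
        rw [show PySem.Int.toStr 4 = "4" from by decide]
        split_ifs <;> first | rfl | (exfalso; omega)
      · simp only [h4, if_false]
        by_cases h8 : v ≤ 8
        · simp only [h8, if_true]
          rw [show (PySem.Dict.get? azTable 8).getD [] = [(16384, "Standard_D8s_v5"), (32768, "Standard_D8s_v5"), (65536, "Standard_D8as_v5")] from by decide]
          norm_num
          rw [azBL3]
          rw [show PySem.Int.toStr 8 = "8" from by decide]
          split_ifs <;> first | rfl | (exfalso; omega)
        · simp only [h8, if_false]
          rw [show (PySem.Dict.get? azTable 16).getD [] = [(32768, "Standard_D16s_v5"), (65536, "Standard_D16s_v5"), (131072, "Standard_D16as_v5")] from by decide]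
          norm_num
          rw [azBL3]
          rw [show PySem.Int.toStr 16 = "16" from by decide]
          split_ifs <;> first | rfl | (exfalso; omega)
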